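-- pv_equiv track=rewrite | github.com/Feltrim/CursoPython-GeekUniversity | Exercicios/Seção 08/ex36.py | superfatorial
-- ===== SOURCE A (Python) =====
-- def superfatorial(n):
--     if n == 0:
--         return 1
--
--     result = 1
--     for i in range(1, n + 1):
--         fatorial = 1
--         for j in range(1, i + 1):
--             fatorial *= j
--         result *= fatorial
--
--     return result
-- ===== SOURCE B (Python) =====
-- def superfatorial(n):
--     if n == 0:
--         return 1
--
--     result = 1
--     fatorial = 1
--     for i in range(1, n + 1):
--         fatorial *= i
--         result *= fatorial
--     return result
-- ===== Notes on version B (the rewrite author's own statement) =====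
-- stated objective: simpler
-- what changed: B maintains a running factorial and multiplies it by i each step, removing A's inner loop that recomputes i! from scratch for every i (fewer multiplications, though bignum growth makes measured time similar).
import Mathlib
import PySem

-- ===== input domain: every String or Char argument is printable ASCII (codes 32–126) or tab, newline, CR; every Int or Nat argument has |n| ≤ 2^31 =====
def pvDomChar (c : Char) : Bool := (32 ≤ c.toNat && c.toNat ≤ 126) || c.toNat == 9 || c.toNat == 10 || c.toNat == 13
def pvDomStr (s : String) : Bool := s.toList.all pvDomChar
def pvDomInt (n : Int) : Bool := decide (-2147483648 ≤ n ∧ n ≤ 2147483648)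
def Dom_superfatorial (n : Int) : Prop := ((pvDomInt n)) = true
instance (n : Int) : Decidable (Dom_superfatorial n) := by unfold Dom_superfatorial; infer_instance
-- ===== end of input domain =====

-- B replaces A's recompute-each-factorial inner loop with one pass keeping a running factorial (simpler).


-- ===== PORT A =====
-- A: for each i in 1..n recompute i! with an inner loop, multiply into result.
def superfatorial (n : Int) : Int :=
  if n = 0 then 1
  else
    (PySem.List.pyRange 1 (n + 1) 1).foldl
      (fun result i =>
        result * ((PySem.List.pyRange 1 (i + 1) 1).foldl (fun fatorial j => fatorial * j) 1))
      1

-- ===== PORT B =====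
-- B: one pass keeping a running factorial; state = (fatorial, result).
def superfatorial_alt (n : Int) : Int :=
  if n = 0 then 1
  else
    ((PySem.List.pyRange 1 (n + 1) 1).foldl
      (fun (p : Int × Int) i => (p.1 * i, p.2 * (p.1 * i)))
      (1, 1)).2

-- ===== PRECONDITION & SPEC =====
def Spec_superfatorial (n : Int) (out : Int) : Prop := out = superfatorial_alt n
instance (n : Int) (out : Int) : Decidable (Spec_superfatorial n out) := by unfold Spec_superfatorial; infer_instance

-- ===== CLAIM (what is proved, stated in full; the proofs are below) =====
def Claim_equal_superfatorial : Prop := ∀ (n : Int), Dom_superfatorial n → Spec_superfatorial n (superfatorial n)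

-- ===== LEMMAS AND PROOFS =====

-- the inner factorial fold of A, as a function of the upper bound
def pvFact (i : Int) : Int :=
  (PySem.List.pyRange 1 (i + 1) 1).foldl (fun fatorial j => fatorial * j) 1

-- B's paired fold computes (k!, A's result) on range 1..k
theorem pv_key (k : Nat) :
    (PySem.List.pyRange 1 ((k : Int) + 1) 1).foldl
        (fun (p : Int × Int) i => (p.1 * i, p.2 * (p.1 * i))) (1, 1)
      = (pvFact k,
         (PySem.List.pyRange 1 ((k : Int) + 1) 1).foldl
           (fun result i => result * pvFact i) 1) := by
  induction k with
  | zero =>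
      simp [PySem.List.pyRange_one_eq_nil (by norm_num : (1:Int) ≤ 1), pvFact]
  | succ m ih =>
      have h1 : (1 : Int) ≤ (m : Int) + 1 := by exact le_add_of_nonneg_left (Int.natCast_nonneg m)
      have h2 : ((m : Int) + 1) ≤ ((m : Int) + 1) + 1 := by linarith
      have hsplit := PySem.List.pyRange_one_append 1 ((m : Int) + 1) (((m : Int) + 1) + 1) h1 h2
      have hsing := PySem.List.pyRange_one_singleton ((m : Int) + 1)
      have hfact : pvFact ((m : Int) + 1) = pvFact (m : Int) * ((m : Int) + 1) := by
        unfold pvFact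
        rw [hsplit, hsing, List.foldl_append]
        simp
      push_cast
      rw [hsplit, hsing, List.foldl_append, List.foldl_append, ih]
      simp [hfact]

-- ===== VERDICT (by name: the statement is the Claim_ definition above) =====
theorem superfatorial_spec : Claim_equal_superfatorial := by
  intro n _ 
  unfold Spec_superfatorial superfatorial superfatorial_alt
  split
  · rfl
  · rcases Int.lt_or_le 0 n with hpos | hle
    · obtain ⟨k, rfl⟩ : ∃ k : Nat, n = (k : Int) :=
        ⟨n.toNat, (Int.toNat_of_nonneg hpos.le).symm⟩
      rw [pv_key k]
      rfl
    · rw [PySem.List.pyRange_one_eq_nil (by linarith : n + 1 ≤ 1)]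
      rfl
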